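-- pv_equiv track=rewrite | github.com/wesley-ihene/toptown-ops | packages/normalization/branches.py | _token_bag_match
-- ===== SOURCE A (Python) =====
-- BRANCH_ALIASES: dict[str, str] = {
--     "waigani": "waigani",
--     "waigani branch": "waigani",
--     "ttc pom waigani branch": "waigani",
--     "ttc waigani branch": "waigani",
--     "ttc waigani": "waigani",
--     "bena road": "bena_road",
--     "bena road branch": "bena_road",
--     "bena road goroka branch": "bena_road",
--     "bena road goroka": "bena_road",
--     "bena road-goroka branch": "bena_road",
--     "ttc bena road branch": "bena_road",
--     "ttc bena road goroka branch": "bena_road",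
--     "ttc bena road-goroka branch": "bena_road",
--     "lae malaita": "lae_malaita",
--     "lae malaita branch": "lae_malaita",
--     "ttc lae malaita branch": "lae_malaita",
--     "ttc lae malaita": "lae_malaita",
--     "lae malaita street shop": "lae_malaita",
--     "malaita street": "lae_malaita",
--     "malaita street shop": "lae_malaita",
--     "lae market branch malaita street": "lae_malaita",
--     "lae 5th street": "lae_5th_street",
--     "lae 5th street branch": "lae_5th_street",
--     "5th street lae branch": "lae_5th_street",
--     "ttc 5th street": "lae_5th_street",
--     "ttc 5th street branch": "lae_5th_street",
--     "ttc 5th street lae branch": "lae_5th_street",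
--     "ttc lae 5th street": "lae_5th_street",
--     "ttc lae 5th street branch": "lae_5th_street",
-- }
--
-- def _token_bag_match(normalized: str) -> tuple[str, str] | None:
--     """Return one alias match when tokens match exactly despite ordering noise."""
--
--     normalized_tokens = tuple(sorted(token for token in normalized.split() if token))
--     if not normalized_tokens:
--         return None
--
--     matches: list[str] = []
--     for alias, slug in BRANCH_ALIASES.items():
--         alias_tokens = tuple(sorted(token for token in alias.split() if token))
--         if alias_tokens == normalized_tokens:
--             matches.append(alias)
--
--     if len(matches) != 1:
--         return None
--     matched_alias = matches[0]
--     return matched_alias, BRANCH_ALIASES[matched_alias]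
-- ===== SOURCE B (Python) =====
-- BRANCH_ALIASES: dict[str, str] = {
--     "waigani": "waigani",
--     "waigani branch": "waigani",
--     "ttc pom waigani branch": "waigani",
--     "ttc waigani branch": "waigani",
--     "ttc waigani": "waigani",
--     "bena road": "bena_road",
--     "bena road branch": "bena_road",
--     "bena road goroka branch": "bena_road",
--     "bena road goroka": "bena_road",
--     "bena road-goroka branch": "bena_road",
--     "ttc bena road branch": "bena_road",
--     "ttc bena road goroka branch": "bena_road",
--     "ttc bena road-goroka branch": "bena_road",
--     "lae malaita": "lae_malaita",
--     "lae malaita branch": "lae_malaita",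
--     "ttc lae malaita branch": "lae_malaita",
--     "ttc lae malaita": "lae_malaita",
--     "lae malaita street shop": "lae_malaita",
--     "malaita street": "lae_malaita",
--     "malaita street shop": "lae_malaita",
--     "lae market branch malaita street": "lae_malaita",
--     "lae 5th street": "lae_5th_street",
--     "lae 5th street branch": "lae_5th_street",
--     "5th street lae branch": "lae_5th_street",
--     "ttc 5th street": "lae_5th_street",
--     "ttc 5th street branch": "lae_5th_street",
--     "ttc 5th street lae branch": "lae_5th_street",
--     "ttc lae 5th street": "lae_5th_street",
--     "ttc lae 5th street branch": "lae_5th_street",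
-- }
--
-- # Inverted index built once at module load: sorted token bag -> aliases sharing it.
-- _BAG_INDEX: dict[tuple[str, ...], list[str]] = {}
-- for _alias in BRANCH_ALIASES:
--     _BAG_INDEX.setdefault(tuple(sorted(_alias.split())), []).append(_alias)
--
--
-- def _token_bag_match(normalized: str) -> tuple[str, str] | None:
--     key = tuple(sorted(normalized.split()))
--     if not key:
--         return None
--     candidates = _BAG_INDEX.get(key, [])
--     if len(candidates) != 1:
--         return None
--     alias = candidates[0]
--     return alias, BRANCH_ALIASES[alias]
-- ===== Notes on version B (the rewrite author's own statement) =====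
-- stated objective: idiomatic
-- what changed: Replaces the per-call loop that re-tokenizes and re-sorts every alias with a precomputed inverted index (sorted token bag -> list of aliases) built once at module load; the call is a single dict lookup, and a bag shared by several aliases still yields None.
import Mathlib
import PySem

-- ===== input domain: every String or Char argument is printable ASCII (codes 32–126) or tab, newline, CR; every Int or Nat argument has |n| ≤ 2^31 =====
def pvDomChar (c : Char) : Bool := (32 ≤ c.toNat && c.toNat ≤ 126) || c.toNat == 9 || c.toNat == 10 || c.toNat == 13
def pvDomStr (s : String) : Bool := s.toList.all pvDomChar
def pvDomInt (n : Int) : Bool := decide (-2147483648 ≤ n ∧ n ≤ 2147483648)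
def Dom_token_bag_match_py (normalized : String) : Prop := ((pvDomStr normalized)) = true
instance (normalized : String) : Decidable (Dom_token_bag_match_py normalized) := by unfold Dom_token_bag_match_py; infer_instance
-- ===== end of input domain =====

-- B replaces the per-call scan over all aliases by a precomputed inverted index
-- (sorted token bag -> aliases sharing it) looked up once per call; same return values.

-- ===== PORT A =====
def pvAliasPairs : List (String × String) := [
  ("waigani", "waigani"),
  ("waigani branch", "waigani"),
  ("ttc pom waigani branch", "waigani"),
  ("ttc waigani branch", "waigani"),
  ("ttc waigani", "waigani"),
  ("bena road", "bena_road"),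
  ("bena road branch", "bena_road"),
  ("bena road goroka branch", "bena_road"),
  ("bena road goroka", "bena_road"),
  ("bena road-goroka branch", "bena_road"),
  ("ttc bena road branch", "bena_road"),
  ("ttc bena road goroka branch", "bena_road"),
  ("ttc bena road-goroka branch", "bena_road"),
  ("lae malaita", "lae_malaita"),
  ("lae malaita branch", "lae_malaita"),
  ("ttc lae malaita branch", "lae_malaita"),
  ("ttc lae malaita", "lae_malaita"),
  ("lae malaita street shop", "lae_malaita"),
  ("malaita street", "lae_malaita"),
  ("malaita street shop", "lae_malaita"),
  ("lae market branch malaita street", "lae_malaita"),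
  ("lae 5th street", "lae_5th_street"),
  ("lae 5th street branch", "lae_5th_street"),
  ("5th street lae branch", "lae_5th_street"),
  ("ttc 5th street", "lae_5th_street"),
  ("ttc 5th street branch", "lae_5th_street"),
  ("ttc 5th street lae branch", "lae_5th_street"),
  ("ttc lae 5th street", "lae_5th_street"),
  ("ttc lae 5th street branch", "lae_5th_street")]

def pvBranchAliases : PySem.Dict String String := PySem.Dict.ofList pvAliasPairs

def token_bag_match_py (normalized : String) : Option (String × String) :=
  -- tuple(sorted(token for token in normalized.split() if token))
  let normalizedTokens :=
    PySem.List.sorted ((PySem.Str.split₀ normalized).filter (fun t => decide (t ≠ ""))) (fun t => t)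
  if normalizedTokens = [] then none
  else
    -- for alias, slug in BRANCH_ALIASES.items(): …
    let matchesList := pvBranchAliases.items.foldl
      (fun acc p =>
        let aliasTokens :=
          PySem.List.sorted ((PySem.Str.split₀ p.1).filter (fun t => decide (t ≠ ""))) (fun t => t)
        if aliasTokens = normalizedTokens then acc ++ [p.1] else acc) []
    if matchesList.length ≠ 1 then none
    else
      match matchesList with
      | a :: _ => some (a, pvBranchAliases.getD a "")  -- matches[0]; KeyError impossible: a is a key of the dict
      | [] => none

-- ===== PORT B =====
-- module-load loop: _BAG_INDEX.setdefault(tuple(sorted(_alias.split())), []).append(_alias)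
def pvBagIndex : PySem.Dict (List String) (List String) :=
  pvBranchAliases.keys.foldl
    (fun d al =>
      d.modify (PySem.List.sorted (PySem.Str.split₀ al) (fun t => t)) [] (fun l => l ++ [al]))
    PySem.Dict.empty

def token_bag_match_py_alt (normalized : String) : Option (String × String) :=
  let key := PySem.List.sorted (PySem.Str.split₀ normalized) (fun t => t)
  if key = [] then none
  else
    let candidates := pvBagIndex.getD key []
    if candidates.length ≠ 1 then none
    else
      match candidates with
      | a :: _ => some (a, pvBranchAliases.getD a "")
      | [] => none

-- ===== PRECONDITION & SPEC =====
def Spec_token_bag_match_py (normalized : String) (out : Option (String × String)) : Prop := out = token_bag_match_py_alt normalized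
instance (normalized : String) (out : Option (String × String)) : Decidable (Spec_token_bag_match_py normalized out) := by unfold Spec_token_bag_match_py; infer_instance

-- ===== CLAIM (what is proved, stated in full; the proofs are below) =====
def Claim_equal_token_bag_match_py : Prop := ∀ (normalized : String), Dom_token_bag_match_py normalized → Spec_token_bag_match_py normalized (token_bag_match_py normalized)

-- ===== LEMMAS AND PROOFS =====

-- every piece produced by s.split() is a nonempty word
theorem pvGoNeNil (s : List Char) : ∀ (cur : List Char) (acc : List (List Char)),
    (∀ t ∈ acc, t ≠ []) → ∀ t ∈ PySem.Chars.split₀.go s cur acc, t ≠ [] := by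
  induction s with
  | nil =>
    intro cur acc hacc t ht
    simp only [PySem.Chars.split₀.go] at ht
    split at ht
    · exact hacc t (by simpa using ht)
    · rename_i hcur
      rcases (by simpa using ht : t ∈ acc ∨ t = cur.reverse) with h | h
      · exact hacc t h
      · subst h
        simpa [List.isEmpty_iff] using hcur
  | cons c rest ih =>
    intro cur acc hacc t ht
    simp only [PySem.Chars.split₀.go] at ht
    split at ht
    · split at ht
      · exact ih [] acc hacc t ht
      · rename_i hcur
        refine ih [] (cur.reverse :: acc) ?_ t ht
        intro u hu
        rcases List.mem_cons.mp hu with h | h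
        · subst h
          simpa [List.isEmpty_iff] using hcur
        · exact hacc u h
    · exact ih (c :: cur) acc hacc t ht

theorem pvSplitNeNil (s : String) : ∀ t ∈ PySem.Str.split₀ s, t ≠ "" := by
  intro t ht h
  have hm : t.toList ∈ PySem.Chars.split₀ s.toList := by
    rw [← PySem.Str.split₀_map_toList]
    exact List.mem_map_of_mem ht
  have := pvGoNeNil s.toList [] [] (by simp) t.toList hm
  subst h
  simp at this

theorem pvFilterSplit (s : String) :
    (PySem.Str.split₀ s).filter (fun t => decide (t ≠ "")) = PySem.Str.split₀ s := by
  rw [List.filter_eq_self]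
  intro t ht
  simpa using pvSplitNeNil s t ht

theorem pvKeyEq (s : String) :
    PySem.List.sorted ((PySem.Str.split₀ s).filter (fun t => decide (t ≠ ""))) (fun t => t)
      = PySem.List.sorted (PySem.Str.split₀ s) (fun t => t) := by
  rw [pvFilterSplit]

theorem pvMapFstFilter {α β : Type} (q : α → Bool) (l : List (α × β)) :
    ((l.filter (fun p => q p.1)).map Prod.fst) = (l.map Prod.fst).filter q := by
  induction l with
  | nil => rfl
  | cons x xs ih =>
    by_cases h : q x.1 <;> simp [h, ih]

theorem pvFilterMapSnd (keyf : String → List String) (l : List String) (k : List String) :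
    ((l.map (fun a => (keyf a, a))).filter (fun p => p.1 == k)).map (fun p => p.2)
      = l.filter (fun a => decide (keyf a = k)) := by
  induction l with
  | nil => rfl
  | cons x xs ih =>
    by_cases h : keyf x = k <;> simp [h, ih]

theorem pvFoldlKeyed (keyf : String → List String) (l : List String)
    (d : PySem.Dict (List String) (List String)) :
    l.foldl (fun d a => d.modify (keyf a) [] (fun t => t ++ [a])) d
      = (l.map (fun a => (keyf a, a))).foldl (fun d p => d.modify p.1 [] (fun t => t ++ [p.2])) d := by
  rw [List.foldl_map]

-- the inverted index at key k holds exactly the aliases whose sorted token bag is k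
theorem pvCandidates (k : List String) :
    pvBagIndex.getD k []
      = pvBranchAliases.keys.filter
          (fun a => decide (PySem.List.sorted (PySem.Str.split₀ a) (fun t => t) = k)) := by
  unfold pvBagIndex
  rw [pvFoldlKeyed (fun a => PySem.List.sorted (PySem.Str.split₀ a) (fun t => t))]
  rw [PySem.Dict.getD_foldl_modify_append, PySem.Dict.getD_empty]
  simpa using pvFilterMapSnd (fun a => PySem.List.sorted (PySem.Str.split₀ a) (fun t => t))
    pvBranchAliases.keys k

-- A's matches list equals the index entry for the same key
theorem pvMatches (tok : List String) :
    pvBranchAliases.items.foldl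
      (fun acc p =>
        if PySem.List.sorted (PySem.Str.split₀ p.1) (fun t => t) = tok
        then acc ++ [p.1] else acc) []
      = pvBagIndex.getD tok [] := by
  rw [pvCandidates]
  have := PySem.List.foldl_append_if
    (fun p : String × String => decide (PySem.List.sorted (PySem.Str.split₀ p.1) (fun t => t) = tok))
    Prod.fst pvBranchAliases.items []
  simp only [decide_eq_true_eq] at this
  rw [this]
  simp only [List.nil_append]
  rw [pvMapFstFilter (fun a => decide (PySem.List.sorted (PySem.Str.split₀ a) (fun t => t) = tok))]
  rfl

-- ===== VERDICT (by name: the statement is the Claim_ definition above) =====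
theorem token_bag_match_py_spec : Claim_equal_token_bag_match_py := by
  intro normalized _
  unfold Spec_token_bag_match_py token_bag_match_py token_bag_match_py_alt
  simp only [pvKeyEq, pvMatches]
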